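-- pv_equiv track=rewrite | github.com/DasLab/RiboGraphViz | RiboGraphViz/RG_utils.py | parse_out_chainbreak
-- ===== SOURCE A (Python) =====
-- def parse_out_chainbreak(secstruct):
--     secstruct_new = []
--     is_chainbreak = []
--
--     chainbreak_ctr=0
--
--     for i, char in enumerate(secstruct):
--         if char in [',','+',' ','&']:
--             is_chainbreak.append(chainbreak_ctr)
--         else:
--             secstruct_new.append(char)
--             chainbreak_ctr+=1
--     return is_chainbreak, ''.join(secstruct_new)
-- ===== SOURCE B (Python) =====
-- def parse_out_chainbreak(secstruct):
--     # Split into segments at every delimiter (staged single-char splits keep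
--     # empty segments), then chainbreak positions are the running totals of
--     # segment lengths at each boundary.
--     segments = [secstruct]
--     for d in ',+ &':
--         segments = [piece for seg in segments for piece in seg.split(d)]
--     is_chainbreak = []
--     total = 0
--     for seg in segments[:-1]:
--         total += len(seg)
--         is_chainbreak.append(total)
--     return is_chainbreak, ''.join(segments)
-- ===== Notes on version B (the rewrite author's own statement) =====
-- stated objective: faster
-- what changed: Replaces A's per-character scan with a running counter by a split-into-segments decomposition: staged single-character str.split calls break the string into segments at every delimiter (keeping empty segments), the chainbreak positions are the running totals of segment lengths at each segment boundary, and the cleaned string is the join of the segments.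
import Mathlib
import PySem

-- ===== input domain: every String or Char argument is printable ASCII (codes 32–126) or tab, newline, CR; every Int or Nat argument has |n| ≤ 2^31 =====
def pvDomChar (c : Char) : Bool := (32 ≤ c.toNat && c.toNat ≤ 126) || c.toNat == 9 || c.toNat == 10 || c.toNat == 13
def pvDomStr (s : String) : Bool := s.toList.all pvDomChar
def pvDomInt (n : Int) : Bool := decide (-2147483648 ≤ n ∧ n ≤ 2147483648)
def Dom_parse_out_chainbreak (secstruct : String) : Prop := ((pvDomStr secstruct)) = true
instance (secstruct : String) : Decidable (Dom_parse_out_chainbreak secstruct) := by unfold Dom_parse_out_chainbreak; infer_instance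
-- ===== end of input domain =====

-- B re-decomposes A's per-character counter scan as: split the string into segments
-- at every delimiter via staged str.split calls, then the chainbreaks are the running
-- totals of segment lengths at each boundary and the cleaned string is their join
-- (same result; a timing run measured B faster at the largest size).

-- ===== PORT A =====
def parse_out_chainbreak (secstruct : String) : List Int × String :=
  let st := (PySem.List.enumerate secstruct.toList).foldl
    (fun (st : List Char × List Int × Int) (p : Int × Char) =>
      if [',', '+', ' ', '&'].contains p.2 then
        (st.1, st.2.1 ++ [st.2.2], st.2.2)
      else
        (st.1 ++ [p.2], st.2.1, st.2.2 + 1))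
    ([], [], 0)
  (st.2.1, String.ofList st.1)

-- ===== PORT B =====
-- segments[:-1] is List.dropLast; each seg.split(d) is PySem.Chars.splitOn seg [d];
-- ''.join(segments) is PySem.Chars.join [].
def parse_out_chainbreak_alt (secstruct : String) : List Int × String :=
  let segments := (",+ &".toList).foldl
    (fun (segs : List (List Char)) (d : Char) =>
      segs.flatMap (fun seg => PySem.Chars.splitOn seg [d]))
    [secstruct.toList]
  let st := (segments.dropLast).foldl
    (fun (st : List Int × Int) (seg : List Char) =>
      (st.1 ++ [st.2 + (seg.length : Int)], st.2 + (seg.length : Int)))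
    ([], 0)
  (st.1, String.ofList (PySem.Chars.join [] segments))

-- ===== PRECONDITION & SPEC =====
def Spec_parse_out_chainbreak (secstruct : String) (out : List Int × String) : Prop := out = parse_out_chainbreak_alt secstruct
instance (secstruct : String) (out : List Int × String) : Decidable (Spec_parse_out_chainbreak secstruct out) := by unfold Spec_parse_out_chainbreak; infer_instance

-- ===== CLAIM =====
def Claim_equal_parse_out_chainbreak : Prop := ∀ (secstruct : String), Dom_parse_out_chainbreak secstruct → Spec_parse_out_chainbreak secstruct (parse_out_chainbreak secstruct)

-- ===== LEMMAS AND PROOFS =====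

-- emitted chainbreak counters of A's loop, as a recursion over the characters
def pvBrkSpec : List Char → Int → List Int
  | [], _ => []
  | c :: cs, ctr => if [',', '+', ' ', '&'].contains c then ctr :: pvBrkSpec cs ctr else pvBrkSpec cs (ctr + 1)

-- splitting at every character satisfying P (keeping empty segments)
def pvSplitC (P : Char → Bool) : List Char → List (List Char)
  | [] => [[]]
  | c :: rest => if P c then [] :: pvSplitC P rest else (pvSplitC P rest).modifyHead (c :: ·)

theorem pvFoldA (cs : List Char) : ∀ (n : Int) (acc : List Char) (brs : List Int) (ctr : Int),
    (PySem.List.enumerate cs n).foldl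
      (fun (st : List Char × List Int × Int) (p : Int × Char) =>
        if [',', '+', ' ', '&'].contains p.2 then
          (st.1, st.2.1 ++ [st.2.2], st.2.2)
        else
          (st.1 ++ [p.2], st.2.1, st.2.2 + 1))
      (acc, brs, ctr)
    = (acc ++ cs.filter (fun c => !([',', '+', ' ', '&'].contains c)), brs ++ pvBrkSpec cs ctr,
       ctr + ((cs.filter (fun c => !([',', '+', ' ', '&'].contains c))).length : Int)) := by
  induction cs with
  | nil =>
    intro n acc brs ctr
    simp [PySem.List.enumerate_nil, pvBrkSpec]
  | cons c cs ih =>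
    intro n acc brs ctr
    rw [PySem.List.enumerate_cons, List.foldl_cons]
    by_cases h : ([',', '+', ' ', '&'].contains c) = true
    · rw [if_pos h, ih, List.filter_cons_of_neg (by simp_all)]
      rw [pvBrkSpec, if_pos h]
      simp
    · rw [if_neg h, ih, List.filter_cons_of_pos (by simp_all)]
      rw [pvBrkSpec, if_neg h]
      refine Prod.ext (by simp) (Prod.ext (by simp) ?_)
      simp only [List.length_cons]
      push_cast
      ring

theorem pvGo (d : Char) : ∀ (l : List Char) (fuel : Nat) (cur : List Char) (acc : List (List Char)),
    l.length < fuel →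
    PySem.Chars.splitOn.go [d] fuel l cur acc
      = acc.reverse ++ (pvSplitC (· == d) l).modifyHead (cur.reverse ++ ·) := by
  intro l
  induction l with
  | nil =>
    intro fuel cur acc h
    cases fuel with
    | zero => omega
    | succ f => simp [PySem.Chars.splitOn.go, pvSplitC]
  | cons c rest ih =>
    intro fuel cur acc h
    cases fuel with
    | zero => omega
    | succ f =>
      rw [PySem.Chars.splitOn.go]
      by_cases hc : c = d
      · subst hc
        rw [if_pos (by simp [List.isPrefixOf])]
        simp only [List.length_cons, List.length_nil, List.drop_succ_cons, List.drop_zero]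
        rw [ih _ _ _ (by simpa using h)]
        simp [pvSplitC]
        cases pvSplitC (fun x => x == c) rest <;> simp
      · rw [if_neg (by simp [List.isPrefixOf]; exact fun hh => absurd hh.symm hc)]
        rw [ih _ _ _ (by simpa using h)]
        simp [pvSplitC, hc, List.modifyHead_modifyHead]
        rfl

theorem pvSplitOn_single (d : Char) (l : List Char) :
    PySem.Chars.splitOn l [d] = pvSplitC (· == d) l := by
  unfold PySem.Chars.splitOn
  rw [pvGo d l (l.length + 1) [] [] (by omega)]
  cases pvSplitC (· == d) l <;> simp

theorem pvSplitC_ne_nil (P : Char → Bool) (l : List Char) : pvSplitC P l ≠ [] := by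
  cases l with
  | nil => simp [pvSplitC]
  | cons c rest =>
    simp only [pvSplitC]
    split
    · simp
    · intro h
      have := congrArg List.length h
      simp at this
      exact absurd this (pvSplitC_ne_nil P rest)

theorem pvStage (P : Char → Bool) (d : Char) (l : List Char) :
    (pvSplitC P l).flatMap (fun s => pvSplitC (· == d) s)
      = pvSplitC (fun c => P c || c == d) l := by
  induction l with
  | nil => simp [pvSplitC]
  | cons c rest ih =>
    by_cases hP : P c = true
    · simp only [pvSplitC, hP, if_pos, Bool.true_or, List.flatMap_cons]
      rw [← ih]
      simp
    · have hPc : P c = false := by simpa using hP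
      simp only [pvSplitC, hPc, Bool.false_eq_true, if_false, Bool.false_or]
      obtain ⟨s, ss, hS⟩ := List.exists_cons_of_ne_nil (pvSplitC_ne_nil P rest)
      by_cases hd : (c == d) = true
      · simp only [if_pos hd]
        rw [hS, List.modifyHead_cons, List.flatMap_cons]
        have : pvSplitC (· == d) (c :: s) = [] :: pvSplitC (· == d) s := by
          simp [pvSplitC, hd]
        rw [this]
        rw [← ih, hS, List.flatMap_cons]
        simp
      · simp only [if_neg hd]
        rw [hS, List.modifyHead_cons, List.flatMap_cons]
        have : pvSplitC (· == d) (c :: s) = (pvSplitC (· == d) s).modifyHead (c :: ·) := by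
          simp [pvSplitC, hd]
        rw [this, ← ih, hS, List.flatMap_cons]
        obtain ⟨u, us, hU⟩ := List.exists_cons_of_ne_nil (pvSplitC_ne_nil (· == d) s)
        rw [hU]
        simp

theorem pvSplitC_false (l : List Char) : pvSplitC (fun _ => false) l = [l] := by
  induction l with
  | nil => rfl
  | cons c rest ih => simp [pvSplitC, ih]

theorem pvFlatten (P : Char → Bool) (l : List Char) :
    (pvSplitC P l).flatten = l.filter (fun c => !P c) := by
  induction l with
  | nil => simp [pvSplitC]
  | cons c rest ih =>
    by_cases hP : P c = true
    · simp [pvSplitC, hP, ih]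
    · simp only [pvSplitC, hP, if_neg, Bool.false_eq_true, not_false_iff]
      obtain ⟨s, ss, hS⟩ := List.exists_cons_of_ne_nil (pvSplitC_ne_nil P rest)
      rw [hS, List.modifyHead_cons]
      have := ih
      rw [hS] at this
      simp at this ⊢
      simp [hP, ← this]

theorem pvJoinNil (xs : List (List Char)) : PySem.Chars.join [] xs = xs.flatten := by
  induction xs with
  | nil => rfl
  | cons x xs ih =>
    cases xs with
    | nil => simp [PySem.Chars.join, List.intercalate]
    | cons y ys =>
      simp only [PySem.Chars.join, List.intercalate] at ih ⊢
      simp [List.intersperse_cons₂, ih]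

-- the delimiter predicate accumulated by B's staged splits equals A's membership test
theorem pvPredEq :
    (fun c => (((((fun _ => false) c || c == ',') || c == '+') || c == ' ') || c == '&'))
      = fun c => [',', '+', ' ', '&'].contains c := by
  funext c
  apply Bool.eq_iff_iff.mpr
  simp [or_assoc]

theorem pvSegs (l : List Char) :
    (",+ &".toList).foldl
      (fun (segs : List (List Char)) (d : Char) =>
        segs.flatMap (fun seg => PySem.Chars.splitOn seg [d]))
      [l]
    = pvSplitC (fun c => [',', '+', ' ', '&'].contains c) l := by
  have hstr : ",+ &".toList = [',', '+', ' ', '&'] := rfl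
  rw [hstr, ← pvSplitC_false l]
  simp only [List.foldl_cons, List.foldl_nil, pvSplitOn_single, pvStage]
  rw [← pvPredEq]

theorem pvChain (l : List Char) : ∀ (acc : List Int) (t : Int),
    (((pvSplitC (fun c => [',', '+', ' ', '&'].contains c) l).dropLast).foldl
      (fun (st : List Int × Int) (seg : List Char) =>
        (st.1 ++ [st.2 + (seg.length : Int)], st.2 + (seg.length : Int)))
      (acc, t)).1
    = acc ++ pvBrkSpec l t := by
  induction l with
  | nil =>
    intro acc t
    simp [pvSplitC, pvBrkSpec]
  | cons c rest ih =>
    intro acc t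
    by_cases hc : ([',', '+', ' ', '&'].contains c) = true
    · simp only [pvSplitC, hc, if_pos]
      obtain ⟨s, ss, hS⟩ := List.exists_cons_of_ne_nil
        (pvSplitC_ne_nil (fun c => [',', '+', ' ', '&'].contains c) rest)
      rw [hS, List.dropLast_cons_of_ne_nil (by simp), List.foldl_cons, ← hS]
      simp only [List.length_nil, Nat.cast_zero, add_zero]
      rw [ih (acc ++ [t]) t]
      rw [pvBrkSpec, if_pos hc]
      simp
    · simp only [pvSplitC, hc, if_neg, Bool.false_eq_true, not_false_iff]
      rw [pvBrkSpec, if_neg hc]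
      obtain ⟨s, ss, hS⟩ := List.exists_cons_of_ne_nil
        (pvSplitC_ne_nil (fun c => [',', '+', ' ', '&'].contains c) rest)
      rw [hS, List.modifyHead_cons]
      cases ss with
      | nil =>
        have := ih acc (t + 1)
        rw [hS] at this
        simpa using this
      | cons u us =>
        rw [List.dropLast_cons_of_ne_nil (by simp), List.foldl_cons]
        have := ih acc (t + 1)
        rw [hS, List.dropLast_cons_of_ne_nil (by simp), List.foldl_cons] at this
        rw [← this]
        congr 2
        simp
        ring

theorem pvMain (s : String) : parse_out_chainbreak s = parse_out_chainbreak_alt s := by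
  unfold parse_out_chainbreak parse_out_chainbreak_alt
  rw [pvFoldA s.toList 0 [] [] 0]
  dsimp only
  rw [pvSegs s.toList, pvJoinNil, pvFlatten]
  have h := pvChain s.toList [] 0
  rw [h]
  simp

-- ===== VERDICT =====
theorem parse_out_chainbreak_spec : Claim_equal_parse_out_chainbreak := by
  intro s _
  exact pvMain s
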